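-- pv_equiv track=rewrite | github.com/qjpike/AoC2021 | 3/main.py | count_pos
-- ===== SOURCE A (Python) =====
-- def count_pos(inp,pos):
--     z = 0
--     o = 0
--     for i in inp:
--         if i[pos] == '0':
--             z += 1
--         else:
--             o += 1
--
--     return z,o
-- ===== SOURCE B (Python) =====
-- def count_pos(inp, pos):
--     # Divide and conquer: split the list in half, count each half, add the pairs.
--     n = len(inp)
--     if n == 0:
--         return 0, 0
--     if n == 1:
--         return (1, 0) if inp[0][pos] == '0' else (0, 1)
--     m = n // 2
--     z1, o1 = count_pos(inp[:m], pos)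
--     z2, o2 = count_pos(inp[m:], pos)
--     return z1 + z2, o1 + o2
-- ===== Notes on version B (the rewrite author's own statement) =====
-- stated objective: alternative
-- what changed: Replaces the two-counter linear loop by a divide-and-conquer recursion that splits the list in half, counts each half recursively and adds the resulting pairs.
import Mathlib
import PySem

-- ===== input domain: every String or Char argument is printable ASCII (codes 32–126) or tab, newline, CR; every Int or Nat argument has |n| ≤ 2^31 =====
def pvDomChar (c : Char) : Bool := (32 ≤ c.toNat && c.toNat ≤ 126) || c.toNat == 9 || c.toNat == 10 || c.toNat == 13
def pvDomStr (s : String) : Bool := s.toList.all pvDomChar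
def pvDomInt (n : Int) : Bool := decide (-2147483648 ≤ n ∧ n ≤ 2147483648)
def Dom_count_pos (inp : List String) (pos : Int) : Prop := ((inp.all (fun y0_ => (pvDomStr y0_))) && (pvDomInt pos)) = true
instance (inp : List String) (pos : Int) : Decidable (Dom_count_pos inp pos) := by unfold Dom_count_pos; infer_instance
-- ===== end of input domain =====

-- B replaces A's two-counter loop by a divide-and-conquer recursion (split in half, count halves, add pairs); alternative decomposition, not faster.
-- ===== PORT A =====
-- loop: for i in inp: if i[pos] == '0': z += 1 else: o += 1
def countPosLoop : List String → Int → Int → Int → Int × Int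
  | [], _, z, o => (z, o)
  | i :: rest, pos, z, o =>
      if PySem.Str.pyGet? i pos = some '0' then countPosLoop rest pos (z + 1) o
      else countPosLoop rest pos z (o + 1)

def count_pos (inp : List String) (pos : Int) : Int × Int := countPosLoop inp pos 0 0

-- ===== PORT B =====
-- divide and conquer on the list; inp[:m] / inp[m:] with m = n//2 ≥ 0 are take/drop (PySem.List.slice_to_natCast / slice_from_natCast)
def count_pos_alt (inp : List String) (pos : Int) : Int × Int :=
  if inp.length = 0 then (0, 0)
  else if inp.length = 1 then
    -- inp[0][pos] == '0' (inp nonempty here, so the none branch is unreachable)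
    match PySem.List.pyGet? inp 0 with
    | some s => if PySem.Str.pyGet? s pos = some '0' then (1, 0) else (0, 1)
    | none => (0, 0)
  else
    let m := inp.length / 2
    ((count_pos_alt (inp.take m) pos).1 + (count_pos_alt (inp.drop m) pos).1,
     (count_pos_alt (inp.take m) pos).2 + (count_pos_alt (inp.drop m) pos).2)
termination_by inp.length
decreasing_by
  · simp only [List.length_take]; omega
  · simp only [List.length_drop]; omega

-- ===== PRECONDITION & SPEC =====
-- Pre_ excludes exactly the inputs where Python A raises IndexError (some string too short for pos).
def Pre_count_pos (inp : List String) (pos : Int) : Prop :=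
  ∀ s ∈ inp, -(s.toList.length : Int) ≤ pos ∧ pos < (s.toList.length : Int)
instance (inp : List String) (pos : Int) : Decidable (Pre_count_pos inp pos) := by unfold Pre_count_pos; infer_instance
def pvWitness_count_pos : List String × Int := (["010", "110", "001"], 1)

def Spec_count_pos (inp : List String) (pos : Int) (out : Int × Int) : Prop := out = count_pos_alt inp pos
instance (inp : List String) (pos : Int) (out : Int × Int) : Decidable (Spec_count_pos inp pos out) := by unfold Spec_count_pos; infer_instance

-- ===== CLAIM (what is proved, stated in full; the proofs are below) =====
def Claim_equal_count_pos : Prop := ∀ (inp : List String) (pos : Int), Dom_count_pos inp pos → Pre_count_pos inp pos → Spec_count_pos inp pos (count_pos inp pos)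

-- ===== LEMMAS AND PROOFS =====

-- the common value: (number of '0's at pos, number of the rest)
def zCount (inp : List String) (pos : Int) : Int :=
  (inp.countP (fun s => PySem.Str.pyGet? s pos = some '0') : Int)

theorem alt_eq (inp : List String) (pos : Int) :
    count_pos_alt inp pos = (zCount inp pos, (inp.length : Int) - zCount inp pos) := by
  fun_induction count_pos_alt inp pos with
  | case1 inp h =>
      have : inp = [] := List.length_eq_zero_iff.mp h
      subst this; simp [zCount]
  | case2 inp h0 h1 s hget hc =>
      obtain ⟨a, rfl⟩ := List.length_eq_one_iff.mp h1
      simp only [PySem.List.pyGet?_zero_cons, Option.some.injEq] at hget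
      subst hget
      rw [show zCount [a] pos = 1 by simp only [PySem.Str.pyGet?, PySem.Chars.pyGet?] at hc; simp [zCount, PySem.Str.pyGet?, PySem.Chars.pyGet?, hc]]
      simp
  | case3 inp h0 h1 s hget hc =>
      obtain ⟨a, rfl⟩ := List.length_eq_one_iff.mp h1
      simp only [PySem.List.pyGet?_zero_cons, Option.some.injEq] at hget
      subst hget
      rw [show zCount [a] pos = 0 by simp only [PySem.Str.pyGet?, PySem.Chars.pyGet?] at hc; simp [zCount, PySem.Str.pyGet?, PySem.Chars.pyGet?, hc]]
      simp
  | case4 inp h0 h1 hget =>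
      obtain ⟨a, rfl⟩ := List.length_eq_one_iff.mp h1
      simp at hget
  | case5 inp h0 h1 m ih1 ih2 =>
      have hmdef : m = inp.length / 2 := rfl
      rw [hmdef] at ih1 ih2 ⊢
      rw [ih1, ih2]
      have hcount : inp.countP (fun s => decide (PySem.Str.pyGet? s pos = some '0'))
            = (inp.take (inp.length / 2)).countP (fun s => decide (PySem.Str.pyGet? s pos = some '0'))
              + (inp.drop (inp.length / 2)).countP (fun s => decide (PySem.Str.pyGet? s pos = some '0')) := by
        conv_lhs => rw [(List.take_append_drop (inp.length / 2) inp).symm]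
        rw [List.countP_append]
      simp only [zCount, hcount, List.length_take, List.length_drop, Prod.mk.injEq]
      constructor <;> omega

theorem loop_eq (inp : List String) (pos : Int) (z o : Int) :
    countPosLoop inp pos z o = (z + zCount inp pos, o + ((inp.length : Int) - zCount inp pos)) := by
  induction inp generalizing z o with
  | nil => simp [countPosLoop, zCount]
  | cons s rest ih =>
      simp only [countPosLoop]
      by_cases hc : PySem.Str.pyGet? s pos = some '0' <;>
        · simp only [hc, if_true, if_false]
          rw [ih]
          simp only [zCount, List.countP_cons, hc, List.length_cons, Prod.mk.injEq,
            decide_true, decide_false]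
          push_cast
          constructor <;> ring

-- ===== VERDICT (by name: the statement is the Claim_ definition above) =====
theorem count_pos_spec : Claim_equal_count_pos := by
  intro inp pos _ _
  unfold Spec_count_pos count_pos
  rw [loop_eq, alt_eq]
  simp
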